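-- pv_equiv track=rewrite | github.com/goelShweta/python | dictionary_intersec2.py | int_dict
-- ===== SOURCE A (Python) =====
-- def int_dict(d1,d2,d3,pos):
--     if len(d1)==pos:
--         return d3
--     else:
--         i=0
--         while i<len(d2):
--             key=list(d1.keys())[pos]
--             if(key==list(d2.keys())[i]):
--                 d3[key]=int(list(d1.values())[pos])
--                 #d3[key]=int(list(d1.values())[pos])+int(list(d2.values())[i])
--                 i=i+1          #trial of sum of common ele #
--             else:
--                 #key=list(d2.keys())[i]
--                 #d3[key]=list(d2.values())[i]
--                 i=i+1
--                 continue
--         #key=list(d1.keys())[pos]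
--         #d3[key]=list(d1.values())[pos]
--         pos=pos+1
--         return(int_dict(d1,d2,d3,pos))
-- ===== SOURCE B (Python) =====
-- def int_dict(d1, d2, d3, pos):
--     items = list(d1.items())
--     while pos != len(d1):
--         key, val = items[pos]
--         if key in d2:
--             d3[key] = int(val)
--         pos += 1
--     return d3
-- ===== Notes on version B (the rewrite author's own statement) =====
-- stated objective: faster
-- what changed: Replaced A's tail recursion over pos with a full inner scan of d2's keys (and list() materializations) per step by a single while loop over d1's items using direct dict membership 'key in d2', so the inner scan disappears.
-- outside the precondition, e.g. on int_dict({}, {}, {}, -1): A returns {}, B raises IndexError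
import Mathlib
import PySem

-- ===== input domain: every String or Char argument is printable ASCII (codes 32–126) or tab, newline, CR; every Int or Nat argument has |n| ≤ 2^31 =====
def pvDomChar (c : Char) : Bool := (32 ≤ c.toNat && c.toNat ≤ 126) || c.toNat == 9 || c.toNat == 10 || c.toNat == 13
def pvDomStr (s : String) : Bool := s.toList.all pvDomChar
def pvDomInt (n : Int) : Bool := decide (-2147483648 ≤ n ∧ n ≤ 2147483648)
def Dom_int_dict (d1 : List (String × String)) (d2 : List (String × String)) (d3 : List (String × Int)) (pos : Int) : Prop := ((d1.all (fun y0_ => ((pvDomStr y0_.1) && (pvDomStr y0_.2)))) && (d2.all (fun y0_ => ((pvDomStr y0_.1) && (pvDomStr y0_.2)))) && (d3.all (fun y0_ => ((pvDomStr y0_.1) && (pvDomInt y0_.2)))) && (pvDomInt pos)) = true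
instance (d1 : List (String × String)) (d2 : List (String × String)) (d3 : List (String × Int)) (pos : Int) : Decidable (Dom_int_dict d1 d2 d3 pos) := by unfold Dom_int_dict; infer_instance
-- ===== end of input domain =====

-- B replaces A's tail recursion with per-step inner scan of d2's keys by one while loop over
-- d1's items using dict membership (faster; A also mutates d3 in place — equivalence is about
-- the return value, which aliases it). Pre_ excludes inputs where Python A raises
-- (IndexError/ValueError/RecursionError) and the corner d2 = {} with pos < -len(d1), where A
-- returns d3 unchanged only because its empty inner loop never indexes d1, while B's loop
-- indexes d1 there and raises IndexError.


-- ===== PORT A =====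
-- inner 'while i < len(d2)' loop: i walks list(d2.keys()); key/value lists of d1 are
-- re-read each iteration, exactly as A does; `none` branches are Python raises (outside Pre_)
def int_dict_inner (d1 : List (String × String)) (pos : Int) :
    List String → PySem.Dict String Int → PySem.Dict String Int
  | [], d3 => d3
  | k2 :: rest, d3 =>
    match PySem.List.pyGet? (d1.map Prod.fst) pos with
    | some key =>
      if key == k2 then
        match PySem.List.pyGet? (d1.map Prod.snd) pos with
        | some v =>
          match PySem.Int.ofStr? v with
          | some m => int_dict_inner d1 pos rest (d3.insert key m)
          | none => d3   -- int() ValueError: Python raises here (outside Pre_)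
        | none => d3     -- IndexError (outside Pre_)
      else int_dict_inner d1 pos rest d3
    | none => d3         -- IndexError (outside Pre_)

-- the tail recursion on pos; fuel (len(d1) - pos) is exactly the number of remaining calls
-- whenever A terminates (pos ≤ len(d1)); for pos > len(d1) Python A never returns
def int_dict_go (d1 d2 : List (String × String)) :
    PySem.Dict String Int → Int → Nat → PySem.Dict String Int
  | d3, _, 0 => d3
  | d3, pos, fuel+1 =>
    if (d1.length : Int) = pos then d3
    else int_dict_go d1 d2 (int_dict_inner d1 pos (d2.map Prod.fst) d3) (pos + 1) fuel

def int_dict (d1 : List (String × String)) (d2 : List (String × String)) (d3 : List (String × Int)) (pos : Int) : List (String × Int) :=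
  (int_dict_go d1 d2 (PySem.Dict.mk d3) pos ((d1.length - pos).toNat)).items

-- ===== PORT B =====
-- one while loop 'while pos != len(d1)' over items = list(d1.items()); 'key in d2' is
-- membership in d2's keys; same fuel argument as above
def int_dict_alt_go (items : List (String × String)) (n : Int) (d2keys : List String) :
    PySem.Dict String Int → Int → Nat → PySem.Dict String Int
  | d3, _, 0 => d3
  | d3, pos, fuel+1 =>
    if pos = n then d3
    else
      match PySem.List.pyGet? items pos with
      | some kv =>
        int_dict_alt_go items n d2keys
          (if d2keys.contains kv.1 then
             match PySem.Int.ofStr? kv.2 with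
             | some m => d3.insert kv.1 m
             | none => d3          -- int() ValueError (outside Pre_)
           else d3)
          (pos + 1) fuel
      | none => d3                 -- IndexError (outside Pre_)

def int_dict_alt (d1 : List (String × String)) (d2 : List (String × String)) (d3 : List (String × Int)) (pos : Int) : List (String × Int) :=
  (int_dict_alt_go d1 (d1.length : Int) (d2.map Prod.fst) (PySem.Dict.mk d3) pos ((d1.length - pos).toNat)).items

-- ===== PRECONDITION & SPEC =====
-- Pre_ = exactly where Python A returns, minus the corner d2 = [] ∧ pos < -len(d1) (A returns
-- d3 unchanged only because the empty inner loop never indexes d1; B raises IndexError there):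
-- pos a valid start index (negative Python indices included), and every d1 entry A will look
-- up in d2 (those from index max(pos,0) on; a negative pos makes A visit all of d1) parses as int.
def Pre_int_dict (d1 : List (String × String)) (d2 : List (String × String)) (d3 : List (String × Int)) (pos : Int) : Prop :=
  -(d1.length : Int) ≤ pos ∧ pos ≤ (d1.length : Int) ∧
  ∀ p ∈ d1.drop pos.toNat, (d2.map Prod.fst).contains p.1 = true → (PySem.Int.ofStr? p.2).isSome = true
instance (d1 : List (String × String)) (d2 : List (String × String)) (d3 : List (String × Int)) (pos : Int) : Decidable (Pre_int_dict d1 d2 d3 pos) := by unfold Pre_int_dict; infer_instance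

def pvWitness_int_dict : (List (String × String)) × (List (String × String)) × (List (String × Int)) × Int :=
  ([("a", "1"), ("b", "2")], [("a", "0")], [], 0)

def Spec_int_dict (d1 : List (String × String)) (d2 : List (String × String)) (d3 : List (String × Int)) (pos : Int) (out : List (String × Int)) : Prop := out = int_dict_alt d1 d2 d3 pos
instance (d1 : List (String × String)) (d2 : List (String × String)) (d3 : List (String × Int)) (pos : Int) (out : List (String × Int)) : Decidable (Spec_int_dict d1 d2 d3 pos out) := by unfold Spec_int_dict; infer_instance

-- ===== CLAIM (what is proved, stated in full; the proofs are below) =====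
def Claim_equal_int_dict : Prop := ∀ (d1 : List (String × String)) (d2 : List (String × String)) (d3 : List (String × Int)) (pos : Int), Dom_int_dict d1 d2 d3 pos → Pre_int_dict d1 d2 d3 pos → Spec_int_dict d1 d2 d3 pos (int_dict d1 d2 d3 pos)

-- ===== LEMMAS AND PROOFS =====

theorem pyGet?_map {α β : Type} (f : α → β) (l : List α) (i : Int) :
    PySem.List.pyGet? (l.map f) i = (PySem.List.pyGet? l i).map f := by
  simp [PySem.List.pyGet?, PySem.List.pyIdx?]

set_option maxRecDepth 4096 in
theorem inner_not_mem (d1 : List (String × String)) (pos : Int) (key : String)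
    (hk : PySem.List.pyGet? (d1.map Prod.fst) pos = some key)
    (ks : List String) (hmem : ks.contains key = false) (d3 : PySem.Dict String Int) :
    int_dict_inner d1 pos ks d3 = d3 := by
  induction ks generalizing d3 with
  | nil => rfl
  | cons k2 rest ih =>
    simp only [List.contains_cons, Bool.or_eq_false_iff] at hmem
    rw [int_dict_inner, hk]
    simp only [hmem.1, Bool.false_eq_true, if_false]
    exact ih hmem.2 d3

set_option maxRecDepth 4096 in
theorem inner_mem (d1 : List (String × String)) (pos : Int) (key v : String) (m : Int)
    (hk : PySem.List.pyGet? (d1.map Prod.fst) pos = some key)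
    (hv : PySem.List.pyGet? (d1.map Prod.snd) pos = some v)
    (hm : PySem.Int.ofStr? v = some m)
    (ks : List String) (hmem : ks.contains key = true) (d3 : PySem.Dict String Int) :
    int_dict_inner d1 pos ks d3 = d3.insert key m := by
  induction ks generalizing d3 with
  | nil => simp at hmem
  | cons k2 rest ih =>
    rw [int_dict_inner, hk]
    by_cases hkk : key = k2
    · simp only [show (key == k2) = true from by simpa using hkk, if_true, hv, hm]
      by_cases hr : rest.contains key = true
      · rw [ih hr]
        exact PySem.Dict.insert_insert_self ..
      · exact inner_not_mem d1 pos key hk rest (by simpa using hr) _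
    · simp only [show (key == k2) = false from by simpa using hkk, Bool.false_eq_true, if_false]
      have hr : rest.contains key = true := by
        simp only [List.contains_cons, Bool.or_eq_true, beq_iff_eq] at hmem
        rcases hmem with h | h
        · exact absurd h hkk
        · exact h
      exact ih hr d3

theorem mem_drop_of_getElem? {α : Type} (l : List α) (i : Nat) (p : α)
    (h : l[i]? = some p) : p ∈ l.drop i := by
  have : (l.drop i)[0]? = some p := by
    rw [List.getElem?_drop]; simpa using h
  exact List.mem_of_getElem? this

theorem go_eq (d1 d2 : List (String × String)) :
    ∀ (fuel : Nat) (pos : Int) (d3 : PySem.Dict String Int),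
    -(d1.length : Int) ≤ pos → pos ≤ (d1.length : Int) →
    (∀ p ∈ d1.drop pos.toNat, (d2.map Prod.fst).contains p.1 = true → (PySem.Int.ofStr? p.2).isSome = true) →
    int_dict_go d1 d2 d3 pos fuel = int_dict_alt_go d1 (d1.length : Int) (d2.map Prod.fst) d3 pos fuel := by
  intro fuel
  induction fuel with
  | zero => intro pos d3 _ _ _; rfl
  | succ fuel ih =>
    intro pos d3 hlo hhi hcond
    by_cases hpos : (d1.length : Int) = pos
    · simp [int_dict_go, int_dict_alt_go, hpos]
    · have hlt : pos < (d1.length : Int) := lt_of_le_of_ne hhi (fun h => hpos h.symm)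
      have hrange : PySem.Raise.InRange d1.length pos := ⟨hlo, hlt⟩
      obtain ⟨p, hp⟩ : ∃ p, PySem.List.pyGet? d1 pos = some p := by
        cases hg : PySem.List.pyGet? d1 pos with
        | none => exact absurd hrange (by rwa [← PySem.List.pyGet?_eq_none_iff] )
        | some p => exact ⟨p, rfl⟩
      have hk : PySem.List.pyGet? (d1.map Prod.fst) pos = some p.1 := by
        rw [pyGet?_map, hp]; rfl
      have hv : PySem.List.pyGet? (d1.map Prod.snd) pos = some p.2 := by
        rw [pyGet?_map, hp]; rfl
      have hpmem : p ∈ d1.drop pos.toNat := by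
        by_cases h0 : 0 ≤ pos
        · have hp' := hp
          rw [PySem.List.pyGet?_of_nonneg d1 h0] at hp'
          exact mem_drop_of_getElem? d1 pos.toNat p hp'
        · have : pos.toNat = 0 := Int.toNat_of_nonpos (le_of_not_ge h0)
          rw [this, List.drop_zero]
          exact PySem.List.mem_of_pyGet?_eq_some d1 hp
      have hstep :
          int_dict_inner d1 pos (d2.map Prod.fst) d3 =
          (if (d2.map Prod.fst).contains p.1 then
             match PySem.Int.ofStr? p.2 with
             | some m => d3.insert p.1 m
             | none => d3
           else d3) := by
        by_cases hc : (d2.map Prod.fst).contains p.1 = true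
        · obtain ⟨m, hm⟩ := Option.isSome_iff_exists.mp (hcond p hpmem hc)
          rw [if_pos hc, hm]
          exact inner_mem d1 pos p.1 p.2 m hk hv hm _ hc d3
        · rw [if_neg hc]
          exact inner_not_mem d1 pos p.1 hk _ (by simpa using hc) d3
      have hrec := ih (pos + 1) (if (d2.map Prod.fst).contains p.1 then
             match PySem.Int.ofStr? p.2 with
             | some m => d3.insert p.1 m
             | none => d3
           else d3)
        (by omega) (by omega)
        (by
          intro q hq hcq
          apply hcond q _ hcq
          have hsub : d1.drop (pos + 1).toNat ⊆ d1.drop pos.toNat := by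
            have h1 : pos.toNat ≤ (pos + 1).toNat := by omega
            rw [show (pos + 1).toNat = pos.toNat + ((pos + 1).toNat - pos.toNat) from by omega,
                ← List.drop_drop]
            exact List.drop_subset _ _
          exact hsub hq)
      rw [int_dict_go, int_dict_alt_go, if_neg hpos,
          if_neg (show ¬pos = (d1.length : Int) from fun h => hpos h.symm), hp, hstep]
      exact hrec

-- ===== VERDICT (by name: the statement is the Claim_ definition above) =====
theorem int_dict_spec : Claim_equal_int_dict := by
  intro d1 d2 d3 pos _ hpre
  obtain ⟨hlo, hhi, hcond⟩ := hpre
  show int_dict d1 d2 d3 pos = int_dict_alt d1 d2 d3 pos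
  unfold int_dict int_dict_alt
  rw [go_eq d1 d2 _ pos (PySem.Dict.mk d3) hlo hhi hcond]
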